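-- pv_equiv track=rewrite | github.com/omkarpatole1799/leetcode-solutions | ds_algo/py/Searching/linearSearchStr.py | linearSearchStr
-- ===== SOURCE A (Python) =====
-- def linearSearchStr(str, target):
--     str = str.lower()
--     target = target.lower()
--     count = -1
--     if(str == ''):
--         return
--     for i in str:
--         count = count + 1
--         if(i == target):
--             return count
-- ===== SOURCE B (Python) =====
-- def linearSearchStr(str, target):
--     str = str.lower()
--     target = target.lower()
--     first = {}
--     for i, ch in enumerate(str):
--         if ch not in first:
--             first[ch] = i
--     return first.get(target)
-- ===== Notes on version B (the rewrite author's own statement) =====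
-- stated objective: alternative
-- what changed: Replaces the counter-driven scan with an early return by a single enumerate pass building a char->first-index dict and one final dict lookup.
import Mathlib
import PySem

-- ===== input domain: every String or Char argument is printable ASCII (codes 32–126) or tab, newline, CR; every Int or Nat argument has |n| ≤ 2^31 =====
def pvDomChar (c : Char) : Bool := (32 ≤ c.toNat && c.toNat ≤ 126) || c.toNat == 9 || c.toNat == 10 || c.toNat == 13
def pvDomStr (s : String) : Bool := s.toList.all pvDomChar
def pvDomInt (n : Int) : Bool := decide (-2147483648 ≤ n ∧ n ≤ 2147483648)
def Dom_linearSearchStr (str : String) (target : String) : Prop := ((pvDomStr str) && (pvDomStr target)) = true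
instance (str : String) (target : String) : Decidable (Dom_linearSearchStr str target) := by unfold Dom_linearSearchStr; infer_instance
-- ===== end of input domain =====

-- B replaces A's counter-driven scan (early return on match) by one enumerate pass
-- building a char -> first-index dict and a single final lookup; same cost, different structure.

-- ===== PORT A =====
-- the for-loop of A: walks the characters keeping the running `count`, returning on the first match
def linearSearchStrLoop (l : List Char) (target : String) (count : Int) : Option Int :=
  match l with
  | [] => none
  | c :: rest =>
    let count := count + 1
    if String.mk [c] = target then some count else linearSearchStrLoop rest target count

def linearSearchStr (str : String) (target : String) : Option Int :=
  let s := PySem.Str.lower str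
  let t := PySem.Str.lower target
  if s = "" then none
  else linearSearchStrLoop s.toList t (-1)

-- ===== PORT B =====
def linearSearchStr_alt (str : String) (target : String) : Option Int :=
  let s := PySem.Str.lower str
  let t := PySem.Str.lower target
  let first : PySem.Dict String Int :=
    (PySem.List.enumerate s.toList).foldl
      (fun d p => if d.contains (String.mk [p.2]) then d else d.insert (String.mk [p.2]) p.1)
      PySem.Dict.empty
  first.get? t

-- ===== PRECONDITION & SPEC =====
def Spec_linearSearchStr (str : String) (target : String) (out : Option Int) : Prop := out = linearSearchStr_alt str target
instance (str : String) (target : String) (out : Option Int) : Decidable (Spec_linearSearchStr str target out) := by unfold Spec_linearSearchStr; infer_instance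

-- ===== CLAIM (what is proved, stated in full; the proofs are below) =====
def Claim_equal_linearSearchStr : Prop := ∀ (str : String) (target : String), Dom_linearSearchStr str target → Spec_linearSearchStr str target (linearSearchStr str target)

-- ===== LEMMAS AND PROOFS =====

theorem linearSearchStrLoop_eq_findIdx? (l : List Char) (t : String) (c : Int) :
    linearSearchStrLoop l t c =
      (l.findIdx? (fun ch => String.mk [ch] == t)).map (fun i => c + 1 + (i : Int)) := by
  induction l generalizing c with
  | nil => simp [linearSearchStrLoop]
  | cons x xs ih =>
    by_cases h : String.mk [x] = t
    · simp [linearSearchStrLoop, h, List.findIdx?_cons]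
    · simp only [linearSearchStrLoop, List.findIdx?_cons, if_neg h,
        beq_iff_eq, if_neg h, ih, Option.map_map]
      cases xs.findIdx? (fun ch => String.mk [ch] == t) <;>
        simp [Function.comp] <;> ring

theorem foldl_first_get? (l : List Char) (t : String) (k : Int)
    (d : PySem.Dict String Int) :
    ((PySem.List.enumerate l k).foldl
      (fun d p => if d.contains (String.mk [p.2]) then d else d.insert (String.mk [p.2]) p.1)
      d).get? t =
      (d.get? t).or ((l.findIdx? (fun ch => String.mk [ch] == t)).map (fun i => k + (i : Int))) := by
  induction l generalizing k d with
  | nil => simp [PySem.List.enumerate_nil]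
  | cons x xs ih =>
    rw [PySem.List.enumerate_cons]
    simp only [List.foldl_cons, List.findIdx?_cons]
    by_cases hx : String.mk [x] = t
    · subst hx
      by_cases hc : d.contains (String.mk [x]) = true
      · rw [if_pos hc, ih]
        rcases h : d.get? (String.mk [x]) with _ | v
        · exact absurd ((PySem.Dict.get?_eq_none_iff_contains d _).mp h) (by simp [hc])
        · simp
      · rw [if_neg hc, ih]
        have hnone : d.get? (String.mk [x]) = none :=
          (PySem.Dict.get?_eq_none_iff_contains d _).mpr (by simpa using hc)
        rw [PySem.Dict.get?_insert_self, hnone]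
        simp
    · have hne : t ≠ String.mk [x] := fun h => hx h.symm
      have hstep : (if d.contains (String.mk [x]) then d
          else d.insert (String.mk [x]) k).get? t = d.get? t := by
        split
        · rfl
        · exact PySem.Dict.get?_insert_of_ne d k hne
      rw [ih, hstep]
      have : (String.mk [x] == t) = false := by simp [hx]
      rw [this]
      simp only [Bool.false_eq_true, if_false, Option.map_map]
      cases xs.findIdx? (fun ch => String.mk [ch] == t) with
      | none => rfl
      | some i =>
        simp only [bind, Bind.bind, Option.bind, pure, Pure.pure, Option.map]
        congr 1
        push_cast
        ring

-- ===== VERDICT (by name: the statement is the Claim_ definition above) =====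
theorem linearSearchStr_spec : Claim_equal_linearSearchStr := by
  intro str target _
  unfold Spec_linearSearchStr linearSearchStr linearSearchStr_alt
  simp only []
  by_cases hs : PySem.Str.lower str = ""
  · rw [if_pos hs, hs]
    simp [PySem.List.enumerate_nil]
  · rw [if_neg hs, linearSearchStrLoop_eq_findIdx?, foldl_first_get? _ _ 0 PySem.Dict.empty,
      PySem.Dict.get?_empty]
    cases (PySem.Str.lower str).toList.findIdx?
        (fun ch => String.mk [ch] == PySem.Str.lower target) <;> simp
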